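-- pv_equiv track=rewrite | github.com/sylvainatn/ANTON_Sylvain_projet_algo | algorithmes_recherche.py | recherche_min_max
-- ===== SOURCE A (Python) =====
-- def recherche_min_max(tab):
--     if not tab:
--         return None, None, 0
--     ops = 0
--     min_val = max_val = tab[0]
--     for v in tab[1:]:
--         ops += 1  # comparaison min
--         if v < min_val:
--             min_val = v
--         ops += 1  # comparaison max
--         if v > max_val:
--             max_val = v
--     return min_val, max_val, ops
-- ===== SOURCE B (Python) =====
-- def recherche_min_max(tab):
--     if not tab:
--         return None, None, 0
--     return min(tab), max(tab), 2 * (len(tab) - 1)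
-- ===== Notes on version B (the rewrite author's own statement) =====
-- stated objective: simpler
-- what changed: Replaces the single accumulating loop with explicit counter by two built-in scans (min, max) and a closed-form comparison count 2*(len(tab)-1).
import Mathlib
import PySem

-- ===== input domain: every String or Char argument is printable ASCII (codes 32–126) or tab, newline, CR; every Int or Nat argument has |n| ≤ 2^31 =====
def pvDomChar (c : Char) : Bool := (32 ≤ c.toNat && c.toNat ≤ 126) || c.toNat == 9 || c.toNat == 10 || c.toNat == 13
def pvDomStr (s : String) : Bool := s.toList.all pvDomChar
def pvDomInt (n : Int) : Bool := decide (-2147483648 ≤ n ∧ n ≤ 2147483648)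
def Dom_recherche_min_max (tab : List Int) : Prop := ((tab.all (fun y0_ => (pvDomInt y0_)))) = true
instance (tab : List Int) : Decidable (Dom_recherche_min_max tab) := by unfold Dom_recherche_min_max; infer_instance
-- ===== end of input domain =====

-- B replaces A's single counting loop by built-in min/max scans and the closed-form count 2*(len-1); simpler, same cost.

-- ===== PORT A =====
def recherche_min_max (tab : List Int) : Option Int × Option Int × Int :=
  match tab with
  | [] => (none, none, 0)
  | h :: _ =>
    let s := (tab.drop 1).foldl
      (fun (st : Int × Int × Int) v =>
        let mn := st.1; let mx := st.2.1; let ops := st.2.2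
        let ops := ops + 1                       -- comparaison min
        let mn := if v < mn then v else mn
        let ops := ops + 1                       -- comparaison max
        let mx := if v > mx then v else mx
        (mn, mx, ops))
      (h, h, 0)
    (some s.1, some s.2.1, s.2.2)

-- ===== PORT B =====
def recherche_min_max_alt (tab : List Int) : Option Int × Option Int × Int :=
  if tab = [] then (none, none, 0)
  else (PySem.List.min? tab (fun y => y), PySem.List.max? tab (fun y => y),
        2 * ((tab.length : Int) - 1))

-- ===== PRECONDITION & SPEC =====
def Spec_recherche_min_max (tab : List Int) (out : Option Int × Option Int × Int) : Prop := out = recherche_min_max_alt tab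
instance (tab : List Int) (out : Option Int × Option Int × Int) : Decidable (Spec_recherche_min_max tab out) := by unfold Spec_recherche_min_max; infer_instance

-- ===== CLAIM (what is proved, stated in full; the proofs are below) =====
def Claim_equal_recherche_min_max : Prop := ∀ (tab : List Int), Dom_recherche_min_max tab → Spec_recherche_min_max tab (recherche_min_max tab)

-- ===== LEMMAS AND PROOFS =====

theorem pv_fold_inv (l : List Int) (mn mx : Int) (ops : Int) :
    l.foldl
      (fun (st : Int × Int × Int) v =>
        let mn := st.1; let mx := st.2.1; let ops := st.2.2
        let ops := ops + 1
        let mn := if v < mn then v else mn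
        let ops := ops + 1
        let mx := if v > mx then v else mx
        (mn, mx, ops))
      (mn, mx, ops)
    = (l.foldl min mn, l.foldl max mx, ops + 2 * l.length) := by
  induction l generalizing mn mx ops with
  | nil => simp
  | cons a t ih =>
    simp only [List.foldl_cons, ih]
    have h1 : (if a < mn then a else mn) = min mn a := by
      rcases lt_or_ge a mn with h | h <;> simp [min_def, *] <;> omega
    have h2 : (if a > mx then a else mx) = max mx a := by
      rcases lt_or_ge mx a with h | h <;> simp [max_def, *] <;> omega
    rw [h1, h2]
    refine Prod.ext rfl (Prod.ext rfl ?_)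
    simp; omega

theorem recherche_min_max_spec : Claim_equal_recherche_min_max := by
  intro tab _
  unfold Spec_recherche_min_max recherche_min_max recherche_min_max_alt
  cases tab with
  | nil => simp
  | cons h t =>
    simp only [List.drop_one, List.tail_cons, pv_fold_inv,
      PySem.List.min?_id_cons, PySem.List.max?_id_cons]
    simp

-- ===== VERDICT (by name: the statement is the Claim_ definition above) =====
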